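-- pv_equiv track=rewrite | github.com/MHCooke/aoc2023 | day 14/sol2.py | tilt_col_up
-- ===== SOURCE A (Python) =====
-- from typing import List
--
-- def tilt_col_up(grid: List[List[str]]) -> List[List[str]]:
--     for col in range(len(grid[0])):
--         for origin_index in range(1, len(grid)):
--             char = grid[origin_index][col]
--             if char != 'O':
--                 continue
--             next_index = origin_index
--             while next_index > 0 and grid[next_index - 1][col] == '.':
--                 next_index -= 1
--             if next_index != origin_index:
--                 grid[next_index][col] = char
--                 grid[origin_index][col] = '.'
--     return grid
-- ===== SOURCE B (Python) =====
-- from typing import List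
--
-- def tilt_col_up(grid: List[List[str]]) -> List[List[str]]:
--     # One pass per column: split the column into runs of 'O'/'.'
--     # separated by blocker cells, rebuild each run with its rocks on top.
--     for col in range(len(grid[0])):
--         out = []
--         run_len = rocks = 0
--         for row in grid:
--             c = row[col]
--             if c == 'O':
--                 run_len += 1
--                 rocks += 1
--             elif c == '.':
--                 run_len += 1
--             else:
--                 out += ['O'] * rocks + ['.'] * (run_len - rocks) + [c]
--                 run_len = rocks = 0
--         out += ['O'] * rocks + ['.'] * (run_len - rocks)
--         for row, c in zip(grid, out):
--             row[col] = c
--     return grid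
-- ===== Notes on version B (the rewrite author's own statement) =====
-- stated objective: alternative
-- what changed: Instead of bubbling each rock upward one cell at a time with an inner while-scan per rock, B makes a single pass per column splitting it into runs of 'O'/'.' separated by blocker cells and rebuilds each run with its rocks first, then writes the column back.
import Mathlib
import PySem

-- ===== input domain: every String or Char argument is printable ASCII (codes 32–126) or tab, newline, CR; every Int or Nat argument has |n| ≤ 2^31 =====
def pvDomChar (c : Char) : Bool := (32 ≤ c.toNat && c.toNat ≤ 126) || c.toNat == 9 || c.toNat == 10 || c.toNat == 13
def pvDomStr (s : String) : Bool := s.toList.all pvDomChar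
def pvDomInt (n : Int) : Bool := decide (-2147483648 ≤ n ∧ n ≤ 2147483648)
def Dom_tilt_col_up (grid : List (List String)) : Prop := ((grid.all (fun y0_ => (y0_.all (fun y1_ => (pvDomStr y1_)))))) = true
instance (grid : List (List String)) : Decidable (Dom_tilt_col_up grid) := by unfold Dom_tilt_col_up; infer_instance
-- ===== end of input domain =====

-- B slides the rocks of each column in one pass (run-splitting) instead of A's per-rock upward
-- bubbling; the proved equivalence is about the returned grid (both Pythons also mutate `grid`
-- in place, to the same final state).

-- ===== PORT A =====
-- grid[i][col] (in range whenever Pre_ holds; "" default never read under Pre_)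
def pvCell (g : List (List String)) (i col : Nat) : String := (g.getD i []).getD col ""

-- the `while next_index > 0 and grid[next_index-1][col] == '.'` loop, counting down
def pvFindNext (g : List (List String)) (col : Nat) : Nat → Nat
  | 0 => 0
  | k+1 => if pvCell g k col == "." then pvFindNext g col k else k+1

-- grid[i][col] = v
def pvSetCell (g : List (List String)) (i col : Nat) (v : String) : List (List String) :=
  g.set i ((g.getD i []).set col v)

-- body of `for origin_index in range(1, len(grid))`
def pvStepA (col : Nat) (g : List (List String)) (i : Nat) : List (List String) :=
  let ch := pvCell g i col
  if ch ≠ "O" then g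
  else
    let ni := pvFindNext g col i
    if ni ≠ i then pvSetCell (pvSetCell g ni col ch) i col "." else g

def tilt_col_up (grid : List (List String)) : List (List String) :=
  (List.range (grid.headD []).length).foldl
    (fun g col => (List.range' 1 (g.length - 1)).foldl (pvStepA col) g) grid

-- ===== PORT B =====
-- body of B's `for row in grid` loop; state = (out, run_len, rocks)
def pvBStep (st : List String × Nat × Nat) (c : String) : List String × Nat × Nat :=
  match st with
  | (out, run, rocks) =>
    if c == "O" then (out, run + 1, rocks + 1)
    else if c == "." then (out, run + 1, rocks)
    else (out ++ List.replicate rocks "O" ++ List.replicate (run - rocks) "." ++ [c], 0, 0)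

-- the final `out += ['O']*rocks + ['.']*(run_len - rocks)`
def pvFinish (st : List String × Nat × Nat) : List String :=
  st.1 ++ List.replicate st.2.2 "O" ++ List.replicate (st.2.1 - st.2.2) "."

-- one column iteration: build `out`, then `for row, c in zip(grid, out): row[col] = c`
def pvColB (col : Nat) (g : List (List String)) : List (List String) :=
  let out := pvFinish (g.foldl (fun st r => pvBStep st (r.getD col "")) ([], 0, 0))
  (g.zip out).map (fun p => p.1.set col p.2)

def tilt_col_up_alt (grid : List (List String)) : List (List String) :=
  (List.range (grid.headD []).length).foldl (fun g col => pvColB col g) grid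

-- ===== PRECONDITION & SPEC =====
-- Pre_ excludes exactly the inputs where A raises IndexError: the empty grid (grid[0]),
-- and ragged grids in which some row is shorter than row 0 (grid[i][col] for col < len(grid[0])).
def Pre_tilt_col_up (grid : List (List String)) : Prop :=
  grid ≠ [] ∧ ∀ r ∈ grid, (grid.headD []).length ≤ r.length
instance (grid : List (List String)) : Decidable (Pre_tilt_col_up grid) := by
  unfold Pre_tilt_col_up; infer_instance

def pvWitness_tilt_col_up : List (List String) :=
  [[".", "#"], ["O", "."], ["#", "O"], ["O", "."]]

def Spec_tilt_col_up (grid : List (List String)) (out : List (List String)) : Prop := out = tilt_col_up_alt grid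
instance (grid : List (List String)) (out : List (List String)) : Decidable (Spec_tilt_col_up grid out) := by unfold Spec_tilt_col_up; infer_instance

-- ===== CLAIM (what is proved, stated in full; the proofs are below) =====
def Claim_equal_tilt_col_up : Prop := ∀ (grid : List (List String)), Dom_tilt_col_up grid → Pre_tilt_col_up grid → Spec_tilt_col_up grid (tilt_col_up grid)

-- ===== LEMMAS AND PROOFS =====

-- ---- column-level counterparts (proof-only) ----
def colOf (g : List (List String)) (col : Nat) : List String := g.map (fun r => r.getD col "")

-- write column `xs` into `g` at `col`
def wz (g : List (List String)) (col : Nat) (xs : List String) : List (List String) :=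
  (g.zip xs).map (fun p => p.1.set col p.2)

def findN (xs : List String) : Nat → Nat
  | 0 => 0
  | k+1 => if xs.getD k "" == "." then findN xs k else k+1

def stepC (xs : List String) (i : Nat) : List String :=
  let ch := xs.getD i ""
  if ch ≠ "O" then xs
  else
    let ni := findN xs i
    if ni ≠ i then (xs.set ni ch).set i "." else xs

def colB (xs : List String) : List String := pvFinish (xs.foldl pvBStep ([], 0, 0))

-- ---- list helper lemmas ----
theorem getD_append_right' (a b : List String) (k : Nat) :
    (a ++ b).getD (a.length + k) "" = b.getD k "" := by
  simp [List.getD, List.getElem?_append_right (by omega : a.length ≤ a.length + k)]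

theorem getD_append_left' (a b : List String) (k : Nat) (h : k < a.length) :
    (a ++ b).getD k "" = a.getD k "" := by
  simp [List.getD, List.getElem?_append_left h]

theorem set_append_right' (a b : List String) (k : Nat) (v : String) :
    (a ++ b).set (a.length + k) v = a ++ b.set k v := by
  induction a with
  | nil => simp
  | cons x t ih => simpa [Nat.succ_add] using ih

theorem getD_replicate' (d k : Nat) (h : k < d) (a : String) :
    (List.replicate d a).getD k "" = a := by
  simp [List.getD, h]

theorem range'_concat' (s n : Nat) : List.range' s (n+1) = List.range' s n ++ [s + n] := by
  simpa using List.range'_concat (s := s) (n := n) (step := 1)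

theorem take_succ' (l : List String) (n : Nat) (h : n < l.length) :
    l.take (n+1) = l.take n ++ [l[n]] := by
  rw [List.take_add_one, List.getElem?_eq_getElem h]; rfl

-- ---- basic bridges ----
theorem cell_wz (g : List (List String)) (col : Nat) (xs : List String)
    (hlen : xs.length = g.length) (hcol : ∀ r ∈ g, col < r.length) (i : Nat) :
    pvCell (wz g col xs) i col = xs.getD i "" := by
  induction g generalizing xs i with
  | nil =>
    have : xs = [] := List.eq_nil_of_length_eq_zero (by simpa using hlen)
    subst this; simp [pvCell, wz, List.getD]
  | cons r g' ih =>
    cases xs with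
    | nil => simp at hlen
    | cons y ys =>
      cases i with
      | zero =>
        have hc : col < r.length := hcol r (by simp)
        simp [pvCell, wz, List.getD, List.getElem?_set_self', List.getElem?_eq_getElem hc]
      | succ j =>
        have := ih ys (by simpa using hlen) (fun r hr => hcol r (by simp [hr])) j
        simpa [pvCell, wz, List.getD] using this

theorem set_wz (g : List (List String)) (col : Nat) (xs : List String)
    (hlen : xs.length = g.length) (i : Nat) (v : String) :
    pvSetCell (wz g col xs) i col v = wz g col (xs.set i v) := by
  induction g generalizing xs i with
  | nil =>
    have : xs = [] := List.eq_nil_of_length_eq_zero (by simpa using hlen)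
    subst this; simp [pvSetCell, wz]
  | cons r g' ih =>
    cases xs with
    | nil => simp at hlen
    | cons y ys =>
      cases i with
      | zero => simp [pvSetCell, wz, List.getD, List.set_set]
      | succ j =>
        have := ih ys (by simpa using hlen) j
        simpa [pvSetCell, wz, List.getD] using this

theorem wz_colOf (g : List (List String)) (col : Nat) (hcol : ∀ r ∈ g, col < r.length) :
    wz g col (colOf g col) = g := by
  induction g with
  | nil => simp [wz, colOf]
  | cons r g' ih =>
    have hc : col < r.length := hcol r (by simp)
    have h1 : r.set col (r[col]?.getD "") = r := by
      rw [List.getElem?_eq_getElem hc]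
      simpa using List.set_getElem_self (l := r) (h := hc)
    have h2 := ih (fun r hr => hcol r (by simp [hr]))
    simp only [wz, colOf, List.getD] at h2 ⊢
    simp [h1, h2]

theorem findNext_wz (g : List (List String)) (col : Nat) (xs : List String)
    (hlen : xs.length = g.length) (hcol : ∀ r ∈ g, col < r.length) (k : Nat) :
    pvFindNext (wz g col xs) col k = findN xs k := by
  induction k with
  | zero => rfl
  | succ j ih =>
    simp only [pvFindNext, findN, cell_wz g col xs hlen hcol, ih]

theorem stepC_length (xs : List String) (i : Nat) : (stepC xs i).length = xs.length := by
  unfold stepC; dsimp only; split_ifs <;> simp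

theorem stepA_wz (g : List (List String)) (col : Nat) (xs : List String)
    (hlen : xs.length = g.length) (hcol : ∀ r ∈ g, col < r.length) (i : Nat) :
    pvStepA col (wz g col xs) i = wz g col (stepC xs i) := by
  unfold pvStepA stepC
  dsimp only
  rw [cell_wz g col xs hlen hcol, findNext_wz g col xs hlen hcol]
  split_ifs with h1 h2
  · rfl
  · rw [set_wz g col xs hlen, set_wz g col _ (by simpa using hlen)]
  · rfl

-- ---- B-side state invariant ----
def InvB (k : Nat) (st : List String × Nat × Nat) : Prop :=
  st.2.2 ≤ st.2.1 ∧ st.1.length + st.2.1 = k ∧ ∀ s, st.1.getLast? = some s → s ≠ "."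

theorem invB_step (k : Nat) (st : List String × Nat × Nat) (c : String) (h : InvB k st) :
    InvB (k+1) (pvBStep st c) := by
  obtain ⟨out, run, rocks⟩ := st
  obtain ⟨h1, h2, h3⟩ := h
  simp only at h1 h2 h3
  unfold pvBStep
  split_ifs with hO hD
  · exact ⟨by simp; omega, by simp; omega, h3⟩
  · exact ⟨by simp; omega, by simp; omega, h3⟩
  · refine ⟨by simp, ?_, ?_⟩
    · simp only [List.length_append, List.length_replicate, List.length_cons,
        List.length_nil]
      omega
    · intro s hs
      rw [List.getLast?_concat] at hs
      have hsc : c = s := by simpa using hs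
      subst hsc
      intro hc
      subst hc
      simp at hD

theorem invB_fold_aux (p : List String) : ∀ (st : List String × Nat × Nat) (k : Nat),
    InvB k st → InvB (k + p.length) (p.foldl pvBStep st) := by
  induction p with
  | nil => intro st k h; simpa using h
  | cons c t ih =>
    intro st k h
    have := ih (pvBStep st c) (k+1) (invB_step k st c h)
    simpa [Nat.add_assoc, Nat.add_comm 1 t.length] using this

theorem invB_fold (p : List String) : InvB p.length (p.foldl pvBStep ([], 0, 0)) := by
  simpa using invB_fold_aux p ([], 0, 0) 0 ⟨by simp, by simp, by simp⟩

theorem colB_length (p : List String) : (colB p).length = p.length := by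
  obtain ⟨h1, h2, _⟩ := invB_fold p
  unfold colB pvFinish
  simp only [List.length_append, List.length_replicate] at h2 ⊢
  omega

-- ---- findN characterisation ----
theorem findN_spec (L : List String) (m : Nat) : ∀ (d : Nat),
    (∀ k, k < d → L.getD (m+k) "" = ".") → (m = 0 ∨ L.getD (m-1) "" ≠ ".") →
    findN L (m + d) = m := by
  intro d
  induction d with
  | zero =>
    intro _ hstop
    cases m with
    | zero => rfl
    | succ j =>
      rcases hstop with h | h
      · omega
      · simp only [findN]
        rw [if_neg (by simpa using h)]
  | succ d ih =>
    intro hdots hstop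
    have heq : m + (d+1) = (m+d) + 1 := by omega
    rw [heq]
    simp only [findN]
    rw [if_pos (by rw [hdots d (by omega)]; simp), ih (fun k hk => hdots k (by omega)) hstop]

-- ---- colB single element ----
theorem colB_one (c : String) : colB [c] = [c] := by
  unfold colB pvFinish pvBStep
  by_cases h1 : c = "O"
  · simp [h1, List.replicate]
  · by_cases h2 : c = "."
    · simp [h1, h2, List.replicate]
    · simp [h1, h2]

-- ---- the column equivalence ----
theorem col_inv (xs : List String) : ∀ (i : Nat), i + 1 ≤ xs.length →
    (List.range' 1 i).foldl stepC xs = colB (xs.take (i+1)) ++ xs.drop (i+1) := by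
  intro i
  induction i with
  | zero =>
    intro h
    cases xs with
    | nil => simp at h
    | cons c t => simp [colB_one]
  | succ i ih =>
    intro h
    rw [range'_concat', List.foldl_append, ih (by omega)]
    have hi1 : i + 1 < xs.length := by omega
    set p := xs.take (i+1) with hp
    have hplen : p.length = i + 1 := by simp [hp]; omega
    set c := xs[i+1] with hc
    have hdrop : xs.drop (i+1) = c :: xs.drop (i+2) := List.drop_eq_getElem_cons hi1
    have htake : xs.take (i+2) = p ++ [c] := take_succ' xs (i+1) hi1
    obtain ⟨st, hst⟩ : ∃ st, p.foldl pvBStep ([],0,0) = st := ⟨_, rfl⟩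
    obtain ⟨out, run, rocks⟩ := st
    have hinv : InvB (i+1) (out, run, rocks) := by
      have hh := invB_fold p; rw [hst] at hh; rwa [hplen] at hh
    obtain ⟨h1, h2, h3⟩ := hinv
    simp only at h1 h2 h3
    have hcolBp : colB p = out ++ List.replicate rocks "O" ++ List.replicate (run - rocks) "." := by
      unfold colB pvFinish; rw [hst]
    set d := run - rocks with hd
    set m := out.length + rocks with hm
    have hlenp : (colB p).length = i + 1 := by rw [colB_length, hplen]
    have hmd : m + d = i + 1 := by rw [hcolBp] at hlenp; simp at hlenp; omega
    set L := colB p ++ xs.drop (i+1) with hL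
    have hcell : L.getD (i+1) "" = c := by
      rw [hL, hdrop, ← hlenp]
      simpa using getD_append_right' (colB p) (c :: xs.drop (i+2)) 0
    have hcongr : colB (p ++ [c]) = pvFinish (pvBStep (out, run, rocks) c) := by
      unfold colB; rw [List.foldl_concat, hst]
    simp only [List.foldl_cons, List.foldl_nil, Nat.add_comm 1 i]
    rw [show i + 1 + 1 = i + 2 from rfl, htake]
    by_cases hOc : c = "O"
    · -- sliding case
      have hb1 : (c == "O") = true := by simp [hOc]
      have hfinO : colB (p ++ [c]) =
          out ++ List.replicate (rocks+1) "O" ++ List.replicate d "." := by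
        rw [hcongr]
        unfold pvBStep pvFinish
        dsimp only
        rw [if_pos hb1]
        have : run + 1 - (rocks + 1) = d := by omega
        simp [this]
      have hdots : ∀ k, k < d → L.getD (m+k) "" = "." := by
        intro k hk
        rw [hL, hcolBp, hm, List.append_assoc, List.append_assoc, Nat.add_assoc]
        rw [getD_append_right' out _ (rocks + k)]
        have e2 := getD_append_right' (List.replicate rocks "O") (List.replicate d "." ++ xs.drop (i+1)) k
        simp only [List.length_replicate] at e2
        rw [e2, getD_append_left' _ _ k (by simpa using hk), getD_replicate' d k hk]
      have hstop : m = 0 ∨ L.getD (m-1) "" ≠ "." := by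
        rcases Nat.eq_zero_or_pos rocks with hr | hr
        · cases hout : out with
          | nil => left; simp [hm, hout, hr]
          | cons o t =>
            right
            have houtpos : 0 < out.length := by rw [hout]; simp
            have hmm : m - 1 < out.length := by omega
            rw [hL, hcolBp, List.append_assoc, List.append_assoc]
            rw [getD_append_left' out _ (m-1) hmm]
            cases hlast : out.getLast? with
            | none => exact absurd (List.getLast?_eq_none_iff.mp hlast) (by rw [hout]; simp)
            | some s =>
              have hs : s ≠ "." := h3 s hlast
              have : out.getD (m-1) "" = s := by
                have h0 : m - 1 = out.length - 1 := by omega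
                rw [h0, List.getD, ← List.getLast?_eq_getElem?, hlast]
                rfl
              rw [this]; exact hs
        · right
          have hmm : m - 1 = out.length + (rocks - 1) := by omega
          rw [hL, hcolBp, List.append_assoc, List.append_assoc, hmm]
          rw [getD_append_right' out _ (rocks - 1)]
          rw [getD_append_left' _ _ (rocks - 1) (by simpa using hr)]
          rw [getD_replicate' rocks (rocks - 1) (by omega) "O"]
          simp
      have hfind : findN L (i+1) = m := by rw [← hmd]; exact findN_spec L m d hdots hstop
      unfold stepC
      dsimp only
      rw [hcell, if_neg (by simp [hOc]), hfind]
      by_cases hd0 : d = 0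
      · rw [if_neg (by omega)]
        rw [hL, hdrop, hcolBp, hfinO, hOc, hd0]
        simp [List.replicate_succ' (n := rocks)]
      · rw [if_pos (by omega)]
        have hd' : d = (d-1) + 1 := by omega
        have hL2 : L = (out ++ List.replicate rocks "O") ++
            ("." :: (List.replicate (d-1) "." ++ ("O" :: xs.drop (i+2)))) := by
          rw [hL, hcolBp, hdrop, hOc]
          conv_lhs => rw [hd', List.replicate_succ]
          simp [List.append_assoc]
        have hmlen : m = (out ++ List.replicate rocks "O").length := by simp [hm]
        have hset1 : L.set m "O" = (out ++ List.replicate rocks "O") ++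
            ("O" :: (List.replicate (d-1) "." ++ ("O" :: xs.drop (i+2)))) := by
          rw [hL2, hmlen]
          rw [show (out ++ List.replicate rocks "O").length
              = (out ++ List.replicate rocks "O").length + 0 by omega]
          rw [set_append_right']
          rfl
        have hi1m : i + 1 = (out ++ List.replicate rocks "O").length + (1 + (d-1)) := by
          simp [← hmd, hm]; omega
        have hset2 : (L.set m "O").set (i+1) "." = (out ++ List.replicate rocks "O") ++
            ("O" :: (List.replicate (d-1) "." ++ ("." :: xs.drop (i+2)))) := by
          rw [hset1, hi1m, set_append_right']
          congr 1
          rw [show (1 + (d-1)) = (d-1) + 1 by omega]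
          simp only [List.set_cons_succ]
          congr 1
          have hsa := set_append_right' (List.replicate (d-1) ".") ("O" :: xs.drop (i+2)) 0 "."
          simp only [List.length_replicate, Nat.add_zero, List.set_cons_zero] at hsa
          rw [hsa]
        rw [hOc] at hfinO ⊢
        rw [hset2, hfinO]
        conv_rhs => rw [hd', List.replicate_succ' (n := d - 1)]
        simp [List.replicate_succ' (n := rocks), List.append_assoc]
    · -- not a rock: the A-step is the identity
      have hid : stepC L (i+1) = L := by
        unfold stepC; dsimp only
        rw [hcell, if_pos hOc]
      rw [hid, hL, hdrop, hcolBp, hcongr]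
      have hbO : (c == "O") = false := beq_eq_false_iff_ne.mpr hOc
      by_cases hDc : c = "."
      · unfold pvBStep pvFinish
        dsimp only
        rw [if_neg (by simp [hbO]), if_pos (by simp [hDc])]
        have : run + 1 - rocks = d + 1 := by omega
        simp only [this]
        conv_rhs => rw [List.replicate_succ' (n := d)]
        simp [hDc, List.append_assoc]
      · have hbD : (c == ".") = false := beq_eq_false_iff_ne.mpr hDc
        unfold pvBStep pvFinish
        dsimp only
        rw [if_neg (by simp [hbO]), if_neg (by simp [hbD])]
        simp [List.append_assoc, hd]

theorem colA_eq_colB (xs : List String) :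
    (List.range' 1 (xs.length - 1)).foldl stepC xs = colB xs := by
  cases hxs : xs with
  | nil => simp [colB, pvFinish, pvBStep]
  | cons c t =>
    have h := col_inv (c :: t) t.length (by simp)
    simpa using h

-- ---- lifting to the grid ----
theorem foldA_wz (g : List (List String)) (col : Nat) (hcol : ∀ r ∈ g, col < r.length)
    (l : List Nat) : ∀ (xs : List String), xs.length = g.length →
    l.foldl (pvStepA col) (wz g col xs) = wz g col (l.foldl stepC xs) := by
  induction l with
  | nil => intro xs _; rfl
  | cons i t ih =>
    intro xs hlen
    simp only [List.foldl_cons]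
    rw [stepA_wz g col xs hlen hcol i, ih (stepC xs i) (by rw [stepC_length]; exact hlen)]

theorem colB_wz (g : List (List String)) (col : Nat) :
    pvColB col g = wz g col (colB (colOf g col)) := by
  unfold pvColB wz colB colOf
  rw [List.foldl_map]

theorem wz_length (g : List (List String)) (col : Nat) (xs : List String)
    (hlen : xs.length = g.length) : (wz g col xs).length = g.length := by
  simp [wz, hlen]

theorem wz_rows (g : List (List String)) (col : Nat) (xs : List String) (m : Nat)
    (hrows : ∀ r ∈ g, m ≤ r.length) : ∀ r ∈ wz g col xs, m ≤ r.length := by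
  intro r' hr'
  simp only [wz, List.mem_map] at hr'
  obtain ⟨⟨r, v⟩, hmem, hset⟩ := hr'
  have : r ∈ g := (List.of_mem_zip hmem).1
  rw [← hset]; simpa using hrows r this

def GoodG (n m : Nat) (g : List (List String)) : Prop :=
  g.length = n ∧ ∀ r ∈ g, m ≤ r.length

theorem colOf_length (g : List (List String)) (col : Nat) : (colOf g col).length = g.length := by
  simp [colOf]

theorem colA_eq_colB_grid (g : List (List String)) (col : Nat)
    (hcol : ∀ r ∈ g, col < r.length) :
    (List.range' 1 (g.length - 1)).foldl (pvStepA col) g = pvColB col g := by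
  have hx : (colOf g col).length = g.length := colOf_length g col
  calc (List.range' 1 (g.length - 1)).foldl (pvStepA col) g
      = (List.range' 1 (g.length - 1)).foldl (pvStepA col) (wz g col (colOf g col)) := by
        rw [wz_colOf g col hcol]
    _ = wz g col ((List.range' 1 (g.length - 1)).foldl stepC (colOf g col)) :=
        foldA_wz g col hcol _ _ hx
    _ = wz g col (colB (colOf g col)) := by rw [← hx, colA_eq_colB]
    _ = pvColB col g := (colB_wz g col).symm

theorem colB_good (n m : Nat) (g : List (List String)) (col : Nat) (hg : GoodG n m g) :
    GoodG n m (pvColB col g) := by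
  obtain ⟨hn, hrows⟩ := hg
  rw [colB_wz]
  constructor
  · rw [wz_length g col _ (by rw [colB_length, colOf_length]), hn]
  · exact wz_rows g col _ m hrows

theorem outer_fold (n m : Nat) (l : List Nat) (hl : ∀ c ∈ l, c < m) :
    ∀ g, GoodG n m g →
      l.foldl (fun g col => (List.range' 1 (g.length - 1)).foldl (pvStepA col) g) g
        = l.foldl (fun g col => pvColB col g) g := by
  induction l with
  | nil => intro g _; rfl
  | cons c t ih =>
    intro g hg
    simp only [List.foldl_cons]
    have hc : ∀ r ∈ g, c < r.length := by
      intro r hr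
      have h1 := hg.2 r hr
      have h2 := hl c (by simp)
      omega
    rw [colA_eq_colB_grid g c hc]
    exact ih (fun x hx => hl x (by simp [hx])) (pvColB c g) (colB_good n m g c hg)

-- ===== VERDICT (by name: the statement is the Claim_ definition above) =====
theorem tilt_col_up_spec : Claim_equal_tilt_col_up := by
  intro grid _ hpre
  unfold Spec_tilt_col_up tilt_col_up tilt_col_up_alt
  exact outer_fold grid.length (grid.headD []).length _
    (by intro c hc; exact (List.mem_range.mp hc)) grid ⟨rfl, hpre.2⟩
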